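-- pv_equiv track=rewrite | github.com/Nickoss441/jarvis | jarvis/tools/install_app.py | _find_allowed_entry
-- ===== SOURCE A (Python) =====
-- _ALLOWED_APPS: dict[str, dict[str, str]] = {
--     "arc": {
--         "brew_cask": "arc",
--         "download_url": "https://arc.net/download",
--     },
--     "spotify": {
--         "brew_cask": "spotify",
--         "download_url": "https://www.spotify.com/download",
--     },
--     "visual studio code": {
--         "brew_cask": "visual-studio-code",
--         "download_url": "https://code.visualstudio.com/Download",
--     },
--     "google chrome": {
--         "brew_cask": "google-chrome",
--         "download_url": "https://www.google.com/chrome/",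
--     },
--     "slack": {
--         "brew_cask": "slack",
--         "download_url": "https://slack.com/downloads/mac",
--     },
-- }
--
-- def _find_allowed_entry(app: str) -> tuple[str, dict[str, str]] | None:
--     key = (app or "").strip().lower()
--     if not key:
--         return None
--     if key in _ALLOWED_APPS:
--         return key, _ALLOWED_APPS[key]
--
--     # Accept exact cask alias values as user input.
--     for app_key, entry in _ALLOWED_APPS.items():
--         if key == entry.get("brew_cask", "").lower():
--             return app_key, entry
--     return None
-- ===== SOURCE B (Python) =====
-- _ALLOWED_APPS: dict[str, dict[str, str]] = {
--     "arc": {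
--         "brew_cask": "arc",
--         "download_url": "https://arc.net/download",
--     },
--     "spotify": {
--         "brew_cask": "spotify",
--         "download_url": "https://www.spotify.com/download",
--     },
--     "visual studio code": {
--         "brew_cask": "visual-studio-code",
--         "download_url": "https://code.visualstudio.com/Download",
--     },
--     "google chrome": {
--         "brew_cask": "google-chrome",
--         "download_url": "https://www.google.com/chrome/",
--     },
--     "slack": {
--         "brew_cask": "slack",
--         "download_url": "https://slack.com/downloads/mac",
--     },
-- }
--
-- # One flat index built once: lowercased cask aliases first (first alias wins),
-- # then canonical keys inserted on top so they take priority on any collision.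
-- _INDEX: dict[str, tuple[str, dict[str, str]]] = {}
-- for _app_key, _entry in _ALLOWED_APPS.items():
--     _INDEX.setdefault(_entry.get("brew_cask", "").lower(), (_app_key, _entry))
-- for _app_key, _entry in _ALLOWED_APPS.items():
--     _INDEX[_app_key] = (_app_key, _entry)
--
--
-- def _find_allowed_entry(app: str) -> tuple[str, dict[str, str]] | None:
--     key = (app or "").strip().lower()
--     if not key:
--         return None
--     return _INDEX.get(key)
-- ===== Notes on version B (the rewrite author's own statement) =====
-- stated objective: idiomatic
-- what changed: Replaces A's two-phase search (direct dict lookup, then a linear scan over all entries lowercasing each brew_cask alias per call) with a module-level index dict built once, mapping every lowercased cask alias and every canonical key (canonicals inserted last so they win collisions) to its (app_key, entry) pair, so the function is a single dict.get.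
import Mathlib
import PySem

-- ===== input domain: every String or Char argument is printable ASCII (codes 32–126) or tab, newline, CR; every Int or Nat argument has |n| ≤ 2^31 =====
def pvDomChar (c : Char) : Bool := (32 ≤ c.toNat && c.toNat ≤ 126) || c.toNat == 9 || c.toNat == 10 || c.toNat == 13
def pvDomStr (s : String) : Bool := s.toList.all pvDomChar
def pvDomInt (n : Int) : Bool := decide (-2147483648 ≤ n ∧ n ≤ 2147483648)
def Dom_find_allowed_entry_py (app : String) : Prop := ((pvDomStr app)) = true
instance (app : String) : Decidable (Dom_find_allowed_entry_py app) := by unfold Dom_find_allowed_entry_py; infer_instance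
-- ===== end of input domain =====

-- B replaces A's direct lookup plus linear alias scan by one precomputed index
-- (canonical keys inserted over lowercased cask aliases) queried with a single get.

-- the module constant _ALLOWED_APPS (dict → association list, insertion order)
def allowedApps : List (String × List (String × String)) :=
  [ ("arc", [("brew_cask", "arc"), ("download_url", "https://arc.net/download")]),
    ("spotify", [("brew_cask", "spotify"), ("download_url", "https://www.spotify.com/download")]),
    ("visual studio code", [("brew_cask", "visual-studio-code"), ("download_url", "https://code.visualstudio.com/Download")]),
    ("google chrome", [("brew_cask", "google-chrome"), ("download_url", "https://www.google.com/chrome/")]),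
    ("slack", [("brew_cask", "slack"), ("download_url", "https://slack.com/downloads/mac")]) ]

-- ===== PORT A =====
-- the alias loop: for app_key, entry in _ALLOWED_APPS.items(): if key == entry.get("brew_cask","").lower(): return app_key, entry
def aliasLoop (key : String) : List (String × List (String × String)) → Option (String × List (String × String))
  | [] => none
  | (app_key, entry) :: rest =>
      if key = PySem.Str.lower (PySem.Dict.getD (PySem.Dict.mk entry) "brew_cask" "") then
        some (app_key, entry)
      else aliasLoop key rest

def find_allowed_entry_py (app : String) : Option (String × (List (String × String))) :=
  -- key = (app or "").strip().lower()
  let key := PySem.Str.lower (PySem.Str.strip (if app == "" then "" else app))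
  if key = "" then none
  else
    match (PySem.Dict.mk allowedApps).get? key with
    | some entry => some (key, entry)          -- key in _ALLOWED_APPS
    | none => aliasLoop key allowedApps        -- accept exact cask alias values

-- ===== PORT B =====
-- _INDEX: setdefault every lowercased alias, then insert every canonical key on top
def indexB : PySem.Dict String (String × List (String × String)) :=
  let d := allowedApps.foldl
    (fun d p =>
      let cask := PySem.Str.lower (PySem.Dict.getD (PySem.Dict.mk p.2) "brew_cask" "")
      if d.contains cask then d else d.insert cask (p.1, p.2))
    PySem.Dict.empty
  allowedApps.foldl (fun d p => d.insert p.1 (p.1, p.2)) d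

def find_allowed_entry_py_alt (app : String) : Option (String × (List (String × String))) :=
  let key := PySem.Str.lower (PySem.Str.strip (if app == "" then "" else app))
  if key = "" then none
  else indexB.get? key

-- ===== PRECONDITION & SPEC =====
def Spec_find_allowed_entry_py (app : String) (out : Option (String × (List (String × String)))) : Prop := out = find_allowed_entry_py_alt app
instance (app : String) (out : Option (String × (List (String × String)))) : Decidable (Spec_find_allowed_entry_py app out) := by unfold Spec_find_allowed_entry_py; infer_instance

-- ===== CLAIM (what is proved, stated in full; the proofs are below) =====
def Claim_equal_find_allowed_entry_py : Prop := ∀ (app : String), Dom_find_allowed_entry_py app → Spec_find_allowed_entry_py app (find_allowed_entry_py app)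

-- ===== LEMMAS AND PROOFS =====

-- both programs are the same function of the normalized key; compare them for every key
theorem key_cases (key : String) :
    (match (PySem.Dict.mk allowedApps).get? key with
      | some entry => some (key, entry)
      | none => aliasLoop key allowedApps)
    = indexB.get? key := by
  have hidx : indexB = PySem.Dict.mk
      [ ("arc", ("arc", [("brew_cask", "arc"), ("download_url", "https://arc.net/download")])),
        ("spotify", ("spotify", [("brew_cask", "spotify"), ("download_url", "https://www.spotify.com/download")])),
        ("visual-studio-code", ("visual studio code", [("brew_cask", "visual-studio-code"), ("download_url", "https://code.visualstudio.com/Download")])),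
        ("google-chrome", ("google chrome", [("brew_cask", "google-chrome"), ("download_url", "https://www.google.com/chrome/")])),
        ("slack", ("slack", [("brew_cask", "slack"), ("download_url", "https://slack.com/downloads/mac")])),
        ("visual studio code", ("visual studio code", [("brew_cask", "visual-studio-code"), ("download_url", "https://code.visualstudio.com/Download")])),
        ("google chrome", ("google chrome", [("brew_cask", "google-chrome"), ("download_url", "https://www.google.com/chrome/")])) ] := by decide
  have e1 : PySem.Str.lower (PySem.Dict.getD (PySem.Dict.mk [("brew_cask", "arc"), ("download_url", "https://arc.net/download")]) "brew_cask" "") = "arc" := by decide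
  have e2 : PySem.Str.lower (PySem.Dict.getD (PySem.Dict.mk [("brew_cask", "spotify"), ("download_url", "https://www.spotify.com/download")]) "brew_cask" "") = "spotify" := by decide
  have e3 : PySem.Str.lower (PySem.Dict.getD (PySem.Dict.mk [("brew_cask", "visual-studio-code"), ("download_url", "https://code.visualstudio.com/Download")]) "brew_cask" "") = "visual-studio-code" := by decide
  have e4 : PySem.Str.lower (PySem.Dict.getD (PySem.Dict.mk [("brew_cask", "google-chrome"), ("download_url", "https://www.google.com/chrome/")]) "brew_cask" "") = "google-chrome" := by decide
  have e5 : PySem.Str.lower (PySem.Dict.getD (PySem.Dict.mk [("brew_cask", "slack"), ("download_url", "https://slack.com/downloads/mac")]) "brew_cask" "") = "slack" := by decide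
  rw [hidx]
  rcases eq_or_ne key "arc" with h | h1
  · subst h; decide
  rcases eq_or_ne key "spotify" with h | h2
  · subst h; decide
  rcases eq_or_ne key "visual studio code" with h | h3
  · subst h; decide
  rcases eq_or_ne key "google chrome" with h | h4
  · subst h; decide
  rcases eq_or_ne key "slack" with h | h5
  · subst h; decide
  rcases eq_or_ne key "visual-studio-code" with h | h6
  · subst h; decide
  rcases eq_or_ne key "google-chrome" with h | h7
  · subst h; decide
  -- key matches none of the seven stored keys: both sides are none
  simp [allowedApps, aliasLoop, e1, e2, e3, e4, e5, PySem.Dict.get?,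
        Ne.symm h1, Ne.symm h2, Ne.symm h3, Ne.symm h4, Ne.symm h5, Ne.symm h6, Ne.symm h7,
        h1, h2, h5, h6, h7]

-- ===== VERDICT (by name: the statement is the Claim_ definition above) =====
theorem find_allowed_entry_py_spec : Claim_equal_find_allowed_entry_py := by
  intro app _
  unfold Spec_find_allowed_entry_py find_allowed_entry_py find_allowed_entry_py_alt
  generalize PySem.Str.lower (PySem.Str.strip (if app == "" then "" else app)) = key
  by_cases hk : key = ""
  · simp [hk]
  · simp only [if_neg hk]
    exact key_cases key
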